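-- pv_equiv track=rewrite | github.com/NDK2509/Python_School_management | main.py | is_not_words
-- ===== SOURCE A (Python) =====
-- def is_not_words(s = str()):
--     if s == '' or s.isspace():
--         return True
--     for i in s.split():
--         if not i.isalnum():
--             return True
--     if any(i.isdigit() for i in s) :
--         return True
--     return False
-- ===== SOURCE B (Python) =====
-- def is_not_words(s = str()):
--     saw_nonspace = False
--     saw_punct = False
--     saw_digit = False
--     for c in s:
--         if not c.isspace():
--             saw_nonspace = True
--             if not c.isalnum():
--                 saw_punct = True
--         if c.isdigit():
--             saw_digit = True
--     return (not saw_nonspace) or saw_punct or saw_digit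
-- ===== Notes on version B (the rewrite author's own statement) =====
-- stated objective: alternative
-- what changed: Replaces A's three separate traversals (emptiness/isspace test, whitespace split with a per-word isalnum scan, and a digit generator over all chars) by one character-by-character pass that maintains three flags (saw non-whitespace, saw non-whitespace non-alnum, saw digit) and combines them at the end.
import Mathlib
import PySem

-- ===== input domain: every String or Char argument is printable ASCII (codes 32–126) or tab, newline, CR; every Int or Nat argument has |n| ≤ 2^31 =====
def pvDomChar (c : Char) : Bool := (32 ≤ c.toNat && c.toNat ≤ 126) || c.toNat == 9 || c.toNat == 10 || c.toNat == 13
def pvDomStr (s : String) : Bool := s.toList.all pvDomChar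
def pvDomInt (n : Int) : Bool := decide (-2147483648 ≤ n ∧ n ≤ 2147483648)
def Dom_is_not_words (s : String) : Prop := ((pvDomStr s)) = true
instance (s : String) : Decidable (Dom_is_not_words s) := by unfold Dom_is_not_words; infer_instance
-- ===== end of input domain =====

-- B replaces A's word-split pass plus separate digit pass by a single character pass with three flags (alternative decomposition, same cost).

-- ===== PORT A =====
-- literal port of A: empty/isspace check, then the for-loop over s.split() returning True
-- on the first non-alnum word (an 'any' over the word list), then any(i.isdigit() for i in s).
def is_not_words (s : String) : Bool :=
  if s == "" || PySem.Str.strIsspace s then true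
  else if (PySem.Chars.split₀ s.toList).any (fun w => !PySem.Chars.strIsalnum w) then true
  else if s.toList.any (fun c => PySem.Chars.isdigit c) then true
  else false

-- ===== PORT B =====
-- literal port of Source B: one fold over the characters carrying (saw_nonspace, saw_punct, saw_digit).
def is_not_words_alt (s : String) : Bool :=
  let st := s.toList.foldl
    (fun (st : Bool × Bool × Bool) c =>
      let st1 := if !PySem.Chars.isspace c then
                   (true, if !PySem.Chars.isalnum c then true else st.2.1, st.2.2)
                 else st
      if PySem.Chars.isdigit c then (st1.1, st1.2.1, true) else st1)
    (false, false, false)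
  !st.1 || st.2.1 || st.2.2

-- ===== PRECONDITION & SPEC =====
def Spec_is_not_words (s : String) (out : Bool) : Prop := out = is_not_words_alt s
instance (s : String) (out : Bool) : Decidable (Spec_is_not_words s out) := by unfold Spec_is_not_words; infer_instance

-- ===== CLAIM (what is proved, stated in full; the proofs are below) =====
def Claim_equal_is_not_words : Prop := ∀ (s : String), Dom_is_not_words s → Spec_is_not_words s (is_not_words s)

-- ===== LEMMAS AND PROOFS =====

-- B's fold with three flag accumulators computes three 'any's.
theorem alt_foldl_eq (l : List Char) (a b c : Bool) :
    l.foldl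
      (fun (st : Bool × Bool × Bool) c =>
        let st1 := if !PySem.Chars.isspace c then
                     (true, if !PySem.Chars.isalnum c then true else st.2.1, st.2.2)
                   else st
        if PySem.Chars.isdigit c then (st1.1, st1.2.1, true) else st1)
      (a, b, c)
    = (a || l.any (fun x => !PySem.Chars.isspace x),
       b || l.any (fun x => !PySem.Chars.isspace x && !PySem.Chars.isalnum x),
       c || l.any (fun x => PySem.Chars.isdigit x)) := by
  induction l generalizing a b c with
  | nil => simp
  | cons x t ih =>
    rw [List.foldl_cons]
    cases hs : PySem.Chars.isspace x <;>
    cases ha : PySem.Chars.isalnum x <;>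
    cases hd : PySem.Chars.isdigit x <;>
      simp only [hs, ha, hd, Bool.not_false, Bool.not_true, ite_false, Bool.false_eq_true,
        if_pos, List.any_cons, Bool.and_true, Bool.and_false, Bool.or_true, Bool.true_or,
        Bool.false_or, ih]

theorem isEmpty_append_singleton (xs : List Char) (x : Char) : (xs ++ [x]).isEmpty = false := by
  simp

-- A's word loop: 'some word of s.split() is not alnum' is 'some non-space char is not alnum'.
theorem go_any (l : List Char) : ∀ (cur : List Char) (acc : List (List Char)),
    (∀ w ∈ acc, w ≠ []) →
    ((PySem.Chars.split₀.go l cur acc).any (fun w => !PySem.Chars.strIsalnum w))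
      = (acc.any (fun w => !PySem.Chars.strIsalnum w)
         || !cur.all PySem.Chars.isalnum
         || l.any (fun c => !PySem.Chars.isspace c && !PySem.Chars.isalnum c)) := by
  induction l with
  | nil =>
    intro cur acc hacc
    cases cur with
    | nil => simp [PySem.Chars.split₀.go]
    | cons x xs =>
      simp [PySem.Chars.split₀.go, PySem.Chars.strIsalnum, List.all_reverse,
        List.any_reverse, isEmpty_append_singleton, Bool.or_comm, Bool.or_assoc]
  | cons x t ih =>
    intro cur acc hacc
    by_cases hs : PySem.Chars.isspace x = true
    · cases cur with
      | nil =>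
        simp only [PySem.Chars.split₀.go, hs, if_pos, List.isEmpty_nil]
        rw [ih [] acc hacc]
        simp [hs]
      | cons y ys =>
        have hacc' : ∀ w ∈ (y :: ys).reverse :: acc, w ≠ [] := by
          intro w hw
          rcases List.mem_cons.mp hw with h | h
          · simp [h]
          · exact hacc w h
        simp only [PySem.Chars.split₀.go, hs, if_pos, List.isEmpty_cons, Bool.false_eq_true,
          if_false]
        rw [ih [] ((y :: ys).reverse :: acc) hacc']
        simp [hs, PySem.Chars.strIsalnum, List.all_reverse, isEmpty_append_singleton,
          Bool.or_assoc, Bool.or_comm, Bool.or_left_comm]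
    · have hs' : PySem.Chars.isspace x = false := by simp [hs]
      simp only [PySem.Chars.split₀.go, hs', Bool.false_eq_true, if_false]
      rw [ih (x :: cur) acc hacc]
      simp [hs', Bool.or_assoc, Bool.or_comm, Bool.or_left_comm, Bool.and_comm]

-- a nonempty string that is not all-whitespace has a non-whitespace character
theorem any_not_space_of_not_isspace (l : List Char) (hne : l ≠ [])
    (h : PySem.Chars.strIsspace l = false) :
    l.any (fun c => !PySem.Chars.isspace c) = true := by
  by_cases hall : l.all PySem.Chars.isspace = true
  · exact absurd h (by simp [PySem.Chars.strIsspace, hall, List.isEmpty_iff, hne])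
  · rcases List.all_eq_false.mp (by simpa using hall) with ⟨c, hc, hcs⟩
    exact List.any_eq_true.mpr ⟨c, hc, by simp [hcs]⟩

-- ===== VERDICT (by name: the statement is the Claim_ definition above) =====
theorem is_not_words_spec : Claim_equal_is_not_words := by
  intro s _
  unfold Spec_is_not_words is_not_words is_not_words_alt
  rw [alt_foldl_eq]
  simp only [Bool.false_or]
  by_cases he : s = ""
  · subst he; simp
  · have hne : s.toList ≠ [] := fun h => he (String.toList_eq_nil_iff.mp h)
    by_cases hsp : PySem.Str.strIsspace s = true
    · have hnosp : s.toList.any (fun c => !PySem.Chars.isspace c) = false := by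
        simp only [PySem.Str.strIsspace, PySem.Chars.strIsspace, Bool.and_eq_true,
          List.all_eq_true] at hsp
        simp only [List.any_eq_false]
        intro c hc; simp [hsp.2 c hc]
      have hsp2 : PySem.Chars.strIsspace s.toList = true := by
        simpa [PySem.Str.strIsspace_eq] using hsp
      simp [PySem.Str.strIsspace_eq, hsp2, hnosp]
    · have hBne : (s == "") = false := by simp [he]
      have hsp' : PySem.Str.strIsspace s = false := by simpa using hsp
      have hany := any_not_space_of_not_isspace s.toList hne
        (PySem.Str.strIsspace_eq s ▸ hsp')
      simp only [hBne, hsp', Bool.or_self, Bool.false_eq_true, if_false, hany,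
        Bool.not_true, Bool.false_or]
      rw [PySem.Chars.split₀]
      rw [go_any s.toList [] [] (by intro w hw; cases hw)]
      simp only [List.any_nil, List.all_nil, Bool.not_true, Bool.false_or]
      split_ifs with h1 h2 <;> simp_all
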